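-- pv_equiv track=rewrite | github.com/ekzm8523/CodingTestPractice | python/toss_next_2022/1.py | solution
-- ===== SOURCE A (Python) =====
-- def solution(skills, team, k):
--     """
--     prefix sum을 사용? two pointer?
--     둘 다 연산량은 비슷할 것 같고 추가 공간복잡도가 필요없는 two pointer가 나을듯
--     """
--     min_team, max_team = min(team) - 1, max(team) - 1
--
--     weight_sum = answer = sum(skills[:k])
--     if 0 <= min_team and max_team <= k - 1:
--         answer *= 2
--     for i in range(k, len(skills)):
--         weight_sum -= skills[i - k]
--         weight_sum += skills[i]
--         if i - k + 1 <= min_team and max_team <= i: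
--             answer = max(weight_sum * 2, answer)
--         else:
--             answer = max(weight_sum, answer)
--
--     return answer
-- ===== SOURCE B (Python) =====
-- def solution(skills, team, k):
--     n = len(skills)
--     lo, hi = min(team) - 1, max(team) - 1
--     prefix = [0]
--     total = 0
--     for x in skills:
--         total += x
--         prefix.append(total)
--     best = None
--     for j in range(max(n - k, 0) + 1):
--         s = prefix[min(j + k, n)] - prefix[j]
--         val = 2 * s if j <= lo and hi <= j + k - 1 else s
--         if best is None or val > best:
--             best = val
--     return best
-- ===== Notes on version B (the rewrite author's own statement) =====
-- stated objective: alternative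
-- what changed: Replaces the incremental sliding-window sum with a special-cased first window by a prefix-sum table and a single uniform loop over window starts computing each window sum by subtraction.
import Mathlib
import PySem

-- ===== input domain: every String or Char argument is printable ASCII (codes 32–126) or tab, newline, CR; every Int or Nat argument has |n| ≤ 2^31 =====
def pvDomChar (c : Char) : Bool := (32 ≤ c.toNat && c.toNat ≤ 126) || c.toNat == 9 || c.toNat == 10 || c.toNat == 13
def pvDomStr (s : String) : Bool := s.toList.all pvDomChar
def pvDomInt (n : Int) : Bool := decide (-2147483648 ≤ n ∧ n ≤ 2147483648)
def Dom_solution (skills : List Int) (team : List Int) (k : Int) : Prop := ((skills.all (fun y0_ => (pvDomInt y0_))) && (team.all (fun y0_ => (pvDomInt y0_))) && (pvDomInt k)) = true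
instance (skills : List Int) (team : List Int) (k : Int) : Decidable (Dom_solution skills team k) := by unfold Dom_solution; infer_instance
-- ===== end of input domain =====

-- B replaces A's incremental sliding-window sum (with its special-cased first window)
-- by a prefix-sum table and one uniform loop over window starts (alternative decomposition, same cost).


-- ===== PORT A =====
-- the body of A's sliding-window for-loop (named for the proofs; same code)
def stepA (skills : List Int) (lo hi kk : Int) (st : Int × Int) (i : Int) : Int × Int :=
  let w := st.1 - PySem.List.pyGetD skills (i - kk) 0 + PySem.List.pyGetD skills i 0
  (w, if i - kk + 1 ≤ lo ∧ hi ≤ i then max (w * 2) st.2 else max w st.2)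

def solution (skills : List Int) (team : List Int) (k : Int) : Int :=
  -- min(team)/max(team): ValueError on empty team is excluded by Pre_solution
  let lo : Int := (PySem.List.min? team (fun x => x)).getD 0 - 1
  let hi : Int := (PySem.List.max? team (fun x => x)).getD 0 - 1
  let init : Int := (PySem.List.slice skills none (some k)).sum
  let answer0 : Int := if 0 ≤ lo ∧ hi ≤ k - 1 then init * 2 else init
  -- for i in range(k, len(skills)); IndexError on k < 0 is excluded by Pre_solution
  let st := (PySem.List.pyRange k (skills.length : Int) 1).foldl (stepA skills lo hi k) (init, answer0)
  st.2

-- ===== PORT B =====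
-- body of B's prefix-building loop (named for the proofs; same code)
def buildStep (st : List Int × Int) (x : Int) : List Int × Int :=
  let total := st.2 + x
  (st.1 ++ [total], total)

-- body of B's window loop (named for the proofs; same code)
def stepB (prefixL : List Int) (n lo hi kk : Int) (best : Option Int) (j : Int) : Option Int :=
  let s := PySem.List.pyGetD prefixL (min (j + kk) n) 0 - PySem.List.pyGetD prefixL j 0
  let val := if j ≤ lo ∧ hi ≤ j + kk - 1 then 2 * s else s
  match best with
  | none => some val
  | some b => if val > b then some val else some b

def solution_alt (skills : List Int) (team : List Int) (k : Int) : Int :=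
  let n : Int := (skills.length : Int)
  -- min(team)/max(team): ValueError on empty team is excluded by Pre_solution
  let lo : Int := (PySem.List.min? team (fun x => x)).getD 0 - 1
  let hi : Int := (PySem.List.max? team (fun x => x)).getD 0 - 1
  let prefixL := (skills.foldl buildStep ([0], 0)).1
  let best := (PySem.List.pyRange 0 (max (n - k) 0 + 1) 1).foldl (stepB prefixL n lo hi k) none
  -- the loop runs at least once, so best is never none; the default is never used
  best.getD 0

-- ===== PRECONDITION & SPEC =====
-- Pre_ excludes exactly the inputs on which A raises: empty team (ValueError from min) and k < 0 (IndexError).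
def Pre_solution (skills : List Int) (team : List Int) (k : Int) : Prop := team ≠ [] ∧ 0 ≤ k
instance (skills : List Int) (team : List Int) (k : Int) : Decidable (Pre_solution skills team k) := by unfold Pre_solution; infer_instance
def pvWitness_solution : List Int × List Int × Int := ([1, 2, 3, 4], [2], 2)

def Spec_solution (skills : List Int) (team : List Int) (k : Int) (out : Int) : Prop := out = solution_alt skills team k
instance (skills : List Int) (team : List Int) (k : Int) (out : Int) : Decidable (Spec_solution skills team k out) := by unfold Spec_solution; infer_instance

-- ===== CLAIM (what is proved, stated in full; the proofs are below) =====
def Claim_equal_solution : Prop := ∀ (skills : List Int) (team : List Int) (k : Int), Dom_solution skills team k → Pre_solution skills team k → Spec_solution skills team k (solution skills team k)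

-- ===== LEMMAS AND PROOFS =====

-- prefix sum of the first i elements
def pvP (skills : List Int) (i : Nat) : Int := (skills.take i).sum

-- candidate value of the window starting at j (doubled when it contains the team range)
def pvG (skills : List Int) (lo hi : Int) (K : Nat) (j : Nat) : Int :=
  let s := pvP skills (min (j + K) skills.length) - pvP skills j
  if (j : Int) ≤ lo ∧ hi ≤ (j : Int) + (K : Int) - 1 then 2 * s else s

theorem pvP_zero (skills : List Int) : pvP skills 0 = 0 := rfl

theorem pvP_clamp (skills : List Int) (m : Nat) :
    pvP skills (min m skills.length) = pvP skills m := by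
  by_cases h : m ≤ skills.length
  · rw [min_eq_left h]
  · have h' : skills.length ≤ m := by omega
    rw [min_eq_right h']
    unfold pvP
    rw [List.take_of_length_le h', List.take_length]

theorem pvP_succ (skills : List Int) (m : Nat) (h : m < skills.length) :
    pvP skills (m + 1) = pvP skills m + skills.getD m 0 := by
  unfold pvP
  rw [List.sum_take_succ skills m h]
  simp [List.getD_eq_getElem?_getD, List.getElem?_eq_getElem h]

theorem pvP_cons (x : Int) (xs : List Int) (m : Nat) :
    pvP (x :: xs) (m + 1) = x + pvP xs m := by
  simp [pvP]

-- A's sliding-window loop computes the running max of pvG over window starts j+1 .. j+m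
theorem loopA (skills : List Int) (lo hi : Int) (K : Nat) :
    ∀ (m j : Nat) (ans : Int), j + K + m = skills.length →
    ((PySem.List.pyRange ((j + K : Nat) : Int) ((skills.length : Nat) : Int) 1).foldl
      (stepA skills lo hi (K : Int)) (pvP skills (j + K) - pvP skills j, ans)).2
    = (List.range' (j + 1) m).foldl (fun a t => max (pvG skills lo hi K t) a) ans := by
  intro m
  induction m with
  | zero =>
    intro j ans h
    rw [PySem.List.pyRange_one_eq_nil (by exact_mod_cast Nat.le_of_eq (by omega))]
    simp [List.range']
  | succ m ih =>
    intro j ans h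
    have hlt : ((j + K : Nat) : Int) < ((skills.length : Nat) : Int) := by
      exact_mod_cast (by omega : j + K < skills.length)
    rw [PySem.List.pyRange_one_cons hlt, List.foldl_cons]
    have hstep : stepA skills lo hi (K : Int) (pvP skills (j + K) - pvP skills j, ans) ((j + K : Nat) : Int)
        = (pvP skills ((j + 1) + K) - pvP skills (j + 1), max (pvG skills lo hi K (j + 1)) ans) := by
      simp only [stepA]
      have e1 : ((j + K : Nat) : Int) - (K : Int) = ((j : Nat) : Int) := by push_cast; ring
      rw [e1, PySem.List.pyGetD_natCast, PySem.List.pyGetD_natCast]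
      have hw : pvP skills (j + K) - pvP skills j - skills.getD j 0 + skills.getD (j + K) 0
          = pvP skills ((j + 1) + K) - pvP skills (j + 1) := by
        have h2 : (j + 1) + K = (j + K) + 1 := by omega
        rw [h2, pvP_succ skills (j + K) (by omega), pvP_succ skills j (by omega)]
        ring
      rw [hw]
      have hcond : (((j : Nat) : Int) + 1 ≤ lo ∧ hi ≤ ((j + K : Nat) : Int))
          ↔ (((j + 1 : Nat) : Int) ≤ lo ∧ hi ≤ ((j + 1 : Nat) : Int) + (K : Int) - 1) := by
        omega
      rw [if_congr hcond rfl rfl]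
      simp only [pvG]
      rw [min_eq_left (by omega : (j + 1) + K ≤ skills.length)]
      rw [mul_comm (pvP skills ((j + 1) + K) - pvP skills (j + 1)) 2,
        apply_ite (fun z => max z ans)]
    rw [hstep]
    have hcast : ((j + K : Nat) : Int) + 1 = (((j + 1) + K : Nat) : Int) := by push_cast; ring
    rw [hcast, List.range'_succ, List.foldl_cons]
    exact ih (j + 1) (max (pvG skills lo hi K (j + 1)) ans) (by omega)

-- B's prefix-building loop yields the table of prefix sums
theorem buildB (xs : List Int) : ∀ (acc : List Int) (t : Int),
    xs.foldl buildStep (acc, t)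
    = (acc ++ (List.range xs.length).map (fun i => t + pvP xs (i + 1)), t + xs.sum) := by
  induction xs with
  | nil => intro acc t; simp [pvP]
  | cons x xs ih =>
    intro acc t
    rw [List.foldl_cons]
    show xs.foldl buildStep (acc ++ [t + x], t + x) = _
    rw [ih]
    refine Prod.ext ?_ ?_
    · simp only [List.length_cons, List.range_succ_eq_map, List.map_cons, List.map_map,
        List.append_assoc, List.singleton_append]
      congr 1
      congr 1
      · rw [pvP_cons x xs 0, pvP_zero]
        ring
      · apply List.map_congr_left
        intro i _
        simp only [Function.comp_apply]
        rw [pvP_cons]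
        ring
    · simp only [List.sum_cons]
      ring

-- B's window loop folds max of pvG over j .. j+m-1
theorem loopB (skills : List Int) (lo hi : Int) (K : Nat) (prefixL : List Int)
    (hgd : ∀ m : Nat, m ≤ skills.length → PySem.List.pyGetD prefixL ((m : Nat) : Int) 0 = pvP skills m) :
    ∀ (m j : Nat) (b : Int), j + m ≤ skills.length + 1 →
    (PySem.List.pyRange ((j : Nat) : Int) ((j + m : Nat) : Int) 1).foldl
      (stepB prefixL ((skills.length : Nat) : Int) lo hi (K : Int)) (some b)
    = some ((List.range' j m).foldl (fun a t => max (pvG skills lo hi K t) a) b) := by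
  intro m
  induction m with
  | zero =>
    intro j b h
    simp only [Nat.add_zero]
    rw [PySem.List.pyRange_one_eq_nil (le_refl _)]
    simp [List.range']
  | succ m ih =>
    intro j b h
    have hlt : ((j : Nat) : Int) < ((j + (m + 1) : Nat) : Int) := by
      exact_mod_cast (by omega : j < j + (m + 1))
    rw [PySem.List.pyRange_one_cons hlt, List.foldl_cons]
    have hstep : stepB prefixL ((skills.length : Nat) : Int) lo hi (K : Int) (some b) ((j : Nat) : Int)
        = some (max (pvG skills lo hi K j) b) := by
      simp only [stepB]
      have hmin : min (((j : Nat) : Int) + (K : Int)) ((skills.length : Nat) : Int)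
          = ((min (j + K) skills.length : Nat) : Int) := by omega
      rw [hmin, hgd _ (by omega), hgd j (by omega)]
      show (if pvG skills lo hi K j > b then some (pvG skills lo hi K j) else some b)
          = some (max (pvG skills lo hi K j) b)
      by_cases hbv : b < pvG skills lo hi K j
      · rw [if_pos hbv, max_eq_left hbv.le]
      · rw [if_neg hbv, max_eq_right (not_lt.mp hbv)]
    rw [hstep]
    have hc2 : ((j : Nat) : Int) + 1 = (((j + 1) : Nat) : Int) := by push_cast; ring
    have hc3 : ((j + (m + 1) : Nat) : Int) = (((j + 1) + m : Nat) : Int) := by push_cast; ring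
    rw [hc2, hc3, List.range'_succ, List.foldl_cons]
    exact ih (j + 1) (max (pvG skills lo hi K j) b) (by omega)

-- ===== VERDICT (by name: the statement is the Claim_ definition above) =====
theorem solution_spec : Claim_equal_solution := by
  unfold Claim_equal_solution
  intro skills team k hdom hpre
  obtain ⟨hteam, hk⟩ := hpre
  unfold Spec_solution
  lift k to ℕ using hk with K
  simp only [solution, solution_alt]
  set lo : Int := (PySem.List.min? team (fun x => x)).getD 0 - 1 with hlo
  set hi : Int := (PySem.List.max? team (fun x => x)).getD 0 - 1 with hhi
  have hplist : (skills.foldl buildStep ([0], 0)).1 = (List.range (skills.length + 1)).map (pvP skills) := by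
    rw [buildB]
    simp only [List.range_succ_eq_map, List.map_cons, List.map_map, List.singleton_append]
    congr 1
    apply List.map_congr_left
    intro i _
    simp only [Function.comp_apply, Nat.succ_eq_add_one]
    ring
  rw [hplist]
  have hgd : ∀ m : Nat, m ≤ skills.length →
      PySem.List.pyGetD ((List.range (skills.length + 1)).map (pvP skills)) ((m : Nat) : Int) 0 = pvP skills m := by
    intro m hm
    rw [PySem.List.pyGetD_natCast]
    rw [List.getD_eq_getElem?_getD, List.getElem?_map, List.getElem?_range (by omega)]
    rfl
  rw [PySem.List.slice_to_natCast]
  have hinit : (skills.take K).sum = pvP skills K := rfl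
  rw [hinit]
  have hpos : (0 : Int) < max ((skills.length : Int) - (K : Int)) 0 + 1 := by omega
  rw [PySem.List.pyRange_one_cons hpos, List.foldl_cons]
  have hstep0 : stepB ((List.range (skills.length + 1)).map (pvP skills)) ((skills.length : Nat) : Int) lo hi (K : Int) none 0
      = some (pvG skills lo hi K 0) := by
    simp only [stepB]
    have hmin : min ((0 : Int) + (K : Int)) ((skills.length : Nat) : Int)
        = ((min (0 + K) skills.length : Nat) : Int) := by omega
    rw [hmin, hgd _ (by omega), PySem.List.pyGetD_zero]
    have h0 : ((List.range (skills.length + 1)).map (pvP skills)).getD 0 0 = pvP skills 0 := by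
      rw [List.range_succ_eq_map]
      simp
    rw [h0]
    simp only [pvG]
    have hcond : ((0 : Int) ≤ lo ∧ hi ≤ (0 : Int) + (K : Int) - 1)
        ↔ (((0 : Nat) : Int) ≤ lo ∧ hi ≤ ((0 : Nat) : Int) + (K : Int) - 1) := by omega
    rw [if_congr hcond rfl rfl]
  rw [hstep0]
  have hg0 : (if 0 ≤ lo ∧ hi ≤ (K : Int) - 1 then pvP skills K * 2 else pvP skills K)
      = pvG skills lo hi K 0 := by
    simp only [pvG]
    have hs : pvP skills (min (0 + K) skills.length) - pvP skills 0 = pvP skills K := by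
      rw [Nat.zero_add, pvP_clamp, pvP_zero, sub_zero]
    rw [hs]
    have hcond : (0 ≤ lo ∧ hi ≤ (K : Int) - 1)
        ↔ (((0 : Nat) : Int) ≤ lo ∧ hi ≤ ((0 : Nat) : Int) + (K : Int) - 1) := by omega
    rw [if_congr hcond rfl rfl]
    split_ifs <;> ring
  by_cases hKn : K ≤ skills.length
  · have hA := loopA skills lo hi K (skills.length - K) 0
      (if 0 ≤ lo ∧ hi ≤ (K : Int) - 1 then pvP skills K * 2 else pvP skills K) (by omega)
    simp only [Nat.zero_add, pvP_zero, sub_zero] at hA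
    rw [hA]
    have hB := loopB skills lo hi K ((List.range (skills.length + 1)).map (pvP skills)) hgd
      (skills.length - K) 1 (pvG skills lo hi K 0) (by omega)
    have e1 : ((1 : Nat) : Int) = (0 : Int) + 1 := by simp
    have e2 : ((1 + (skills.length - K) : Nat) : Int) = max ((skills.length : Int) - (K : Int)) 0 + 1 := by omega
    rw [e1, e2] at hB
    rw [hB, hg0]
    rfl
  · have hKn' : skills.length < K := by omega
    rw [PySem.List.pyRange_one_eq_nil (by exact_mod_cast hKn'.le : ((skills.length : Nat) : Int) ≤ ((K : Nat) : Int))]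
    have e3 : max ((skills.length : Int) - (K : Int)) 0 + 1 = 1 := by omega
    rw [e3, PySem.List.pyRange_one_eq_nil (show (1 : Int) ≤ 0 + 1 by omega)]
    simp only [List.foldl_nil]
    rw [hg0]
    rfl
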